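-- pv_equiv track=rewrite | github.com/Dubstepticons/APPV4 | panels/panel2/helpers.py | extract_symbol_display
-- ===== SOURCE A (Python) =====
-- def extract_symbol_display(full_symbol: str) -> str:
--     """
--     Extract 3-letter display symbol from full DTC symbol.
--
--     Args:
--         full_symbol: Full DTC symbol (e.g., "F.US.MESZ25")
--
--     Returns:
--         3-letter symbol (e.g., "MES")
--
--     Examples:
--         extract_symbol_display("F.US.MESZ25") -> "MES"
--         extract_symbol_display("F.US.ESH25") -> "ESH"
--         extract_symbol_display("UNKNOWN") -> "UNKNOWN"
--
--     Note:
--         Looks for pattern: *.US.XXX* where XXX are the 3 letters we want.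
--         If format doesn't match, returns full symbol as-is.
--     """
--     try:
--         # Look for pattern: *.US.XXX* where XXX are the 3 letters we want
--         parts = full_symbol.split(".")
--         for i, part in enumerate(parts):
--             if part == "US" and i + 1 < len(parts):
--                 # Get the next part after 'US'
--                 next_part = parts[i + 1]
--                 if len(next_part) >= 3:
--                     # Extract first 3 letters
--                     return next_part[:3].upper()
--         # Fallback: return as-is
--         return full_symbol.strip().upper()
--     except Exception:
--         return full_symbol.strip().upper()
-- ===== SOURCE B (Python) =====
-- def extract_symbol_display(full_symbol: str) -> str:
--     """Extract 3-letter display symbol from full DTC symbol.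
--
--     Cursor-based scan over the raw string: instead of splitting into a list
--     of fields, walk the dot positions with str.find.  At each field start i,
--     the field ends at the next dot j (no dot => last field, no successor =>
--     fallback); if the field is exactly "US", the successor field runs from
--     j+1 to the following dot (or end of string), and if it is >= 3 chars
--     long its first three characters are returned upper-cased.
--     """
--     try:
--         s = full_symbol
--         i = 0
--         while True:
--             j = s.find(".", i)
--             if j == -1:
--                 break
--             if s[i:j] == "US":
--                 k = s.find(".", j + 1)
--                 end = len(s) if k == -1 else k
--                 if end - (j + 1) >= 3:
--                     return s[j + 1:j + 4].upper()
--             i = j + 1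
--         return full_symbol.strip().upper()
--     except Exception:
--         return full_symbol.strip().upper()
-- ===== Notes on version B (the rewrite author's own statement) =====
-- stated objective: alternative
-- what changed: Replaces split('.')-into-a-list plus an indexed scan with lookahead by a cursor walk over the raw string: repeated str.find('.', i) locates field boundaries in place and slicing compares/extracts the fields, so no parts list is ever built.
import Mathlib
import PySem

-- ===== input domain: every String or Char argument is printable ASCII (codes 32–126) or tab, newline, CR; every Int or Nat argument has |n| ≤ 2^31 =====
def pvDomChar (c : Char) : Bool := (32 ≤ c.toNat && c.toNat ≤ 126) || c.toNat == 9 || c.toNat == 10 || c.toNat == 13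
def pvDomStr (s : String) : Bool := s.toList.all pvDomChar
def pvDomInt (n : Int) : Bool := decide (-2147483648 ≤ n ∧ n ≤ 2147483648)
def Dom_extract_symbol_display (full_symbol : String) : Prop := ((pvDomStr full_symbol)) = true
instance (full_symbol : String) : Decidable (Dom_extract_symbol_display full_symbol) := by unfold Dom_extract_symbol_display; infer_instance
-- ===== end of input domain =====

-- B replaces A's split-into-a-list-then-indexed-scan by a cursor walk over the raw string using
-- repeated str.find('.', i) and slicing (alternative decomposition, same cost).
-- A's try/except can never fire on a str input (nothing in the body raises), so neither port carries it.

-- the fallback both sources share: full_symbol.strip().upper()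
def pvFallback (full_symbol : String) : String := PySem.Str.upper (PySem.Str.strip full_symbol)

-- ===== PORT A =====
-- parts = full_symbol.split(".")  (sep "." ≠ "", so split? is always some)
def pvParts (full_symbol : String) : List String := (PySem.Str.split? full_symbol ".").getD []

-- the for-loop over enumerate(parts) with early return; fallback = full_symbol.strip().upper()
def pvA_loop (full_symbol : String) (parts : List String) : List (Int × String) → String
  | [] => pvFallback full_symbol
  | (i, part) :: rest =>
    if part == "US" && decide (i + 1 < (parts.length : Int)) then
      -- the guard i + 1 < len(parts) puts the index in range, so pyGet? is some; getD "" is unreachable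
      let next_part := (PySem.List.pyGet? parts (i + 1)).getD ""
      if decide (3 ≤ PySem.Str.len next_part) then
        PySem.Str.upper (PySem.Str.slice next_part none (some 3))
      else pvA_loop full_symbol parts rest
    else pvA_loop full_symbol parts rest

def extract_symbol_display (full_symbol : String) : String :=
  pvA_loop full_symbol (pvParts full_symbol) (PySem.List.enumerate (pvParts full_symbol) 0)

-- ===== PORT B =====
-- B's while loop: i is the current field start; j = s.find(".", i) the field's closing dot
-- (j = -1: last field has no successor, break to the fallback); s[i:j] == "US" tests the field,
-- the successor field runs from j+1 to the next dot k (or end of string), and if ≥ 3 chars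
-- long its first three chars s[j+1:j+4] are returned upper-cased; else continue at i = j+1.
-- The fuel argument only makes the recursion structural: each iteration advances the cursor past
-- a '.' of s, so with fuel = len(s)+1 the fuel never runs out (pvB_loop_eq proves the loop's value).
def pvB_loop (full_symbol : String) (s : List Char) : Nat → Nat → String
  | 0, _ => pvFallback full_symbol
  | fuel + 1, i =>
    let j := PySem.Chars.findFrom s ['.'] (i : Int) none
    if j = -1 then pvFallback full_symbol
    else
      if PySem.Chars.slice s (some (i : Int)) (some j) == ['U', 'S'] then
        let k := PySem.Chars.findFrom s ['.'] (j + 1) none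
        let e : Int := if k = -1 then (s.length : Int) else k
        if 3 ≤ e - (j + 1) then
          PySem.Str.upper (String.ofList (PySem.Chars.slice s (some (j + 1)) (some (j + 4))))
        else pvB_loop full_symbol s fuel (j.toNat + 1)
      else pvB_loop full_symbol s fuel (j.toNat + 1)

def extract_symbol_display_alt (full_symbol : String) : String :=
  pvB_loop full_symbol full_symbol.toList (full_symbol.toList.length + 1) 0

-- ===== PRECONDITION & SPEC =====
def Spec_extract_symbol_display (full_symbol : String) (out : String) : Prop := out = extract_symbol_display_alt full_symbol
instance (full_symbol : String) (out : String) : Decidable (Spec_extract_symbol_display full_symbol out) := by unfold Spec_extract_symbol_display; infer_instance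

-- ===== CLAIM (what is proved, stated in full; the proofs are below) =====
def Claim_equal_extract_symbol_display : Prop := ∀ (full_symbol : String), Dom_extract_symbol_display full_symbol → Spec_extract_symbol_display full_symbol (extract_symbol_display full_symbol)

-- ===== LEMMAS AND PROOFS =====

-- "is not a dot", the predicate giving the first field of a suffix as a takeWhile
def pvND (c : Char) : Bool := c != '.'

-- the dot-separated fields of a character list (split(".") at character level)
def pvFields : List Char → List (List Char)
  | [] => [[]]
  | c :: r =>
    if c = '.' then [] :: pvFields r
    else
      match pvFields r with
      | [] => [[c]]   -- unreachable: pvFields is never []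
      | f :: fs => (c :: f) :: fs

lemma pvFields_ne_nil (r : List Char) : pvFields r ≠ [] := by
  cases r with
  | nil => simp [pvFields]
  | cons c t =>
    simp only [pvFields]
    split_ifs
    · simp
    · cases h : pvFields t <;> simp

lemma pvFields_head (r : List Char) :
    (pvFields r).head? = some (r.takeWhile pvND) := by
  induction r with
  | nil => simp [pvFields]
  | cons c t ih =>
    simp only [pvFields, List.takeWhile]
    by_cases hc : c = '.'
    · simp [hc, pvND]
    · cases h : pvFields t with
      | nil => exact absurd h (pvFields_ne_nil t)
      | cons f fs =>
        rw [h] at ih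
        simp only [List.head?_cons, Option.some.injEq] at ih
        have hnd : (c != '.') = true := by simp [hc]
        simp [pvND, hc, hnd, ih]

lemma pvFields_of_not_mem (r : List Char) (h : '.' ∉ r) : pvFields r = [r] := by
  induction r with
  | nil => simp [pvFields]
  | cons c t ih =>
    simp only [List.mem_cons, not_or] at h
    simp [pvFields, Ne.symm h.1, ih h.2]

lemma pvFields_of_mem (r : List Char) (h : '.' ∈ r) :
    pvFields r = r.takeWhile pvND :: pvFields ((r.dropWhile pvND).tail) := by
  induction r with
  | nil => simp at h
  | cons c t ih =>
    by_cases hc : c = '.'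
    · subst hc; simp [pvFields, List.takeWhile, List.dropWhile, pvND]
    · have hm : '.' ∈ t := by
        rcases List.mem_cons.mp h with h1 | h1
        · exact absurd h1.symm hc
        · exact h1
      rw [pvFields, ih hm]
      have hnd : (c != '.') = true := by simp [hc]
      simp [List.takeWhile_cons, List.dropWhile_cons, pvND, hc, hnd]

lemma pv_takeWhile_of_not_mem (r : List Char) (h : '.' ∉ r) : r.takeWhile pvND = r := by
  apply List.takeWhile_eq_self_iff.mpr
  intro x hx
  simp only [pvND, bne_iff_ne, ne_eq]
  rintro rfl; exact h hx

-- PySem.Chars.splitOn.go on sep = "." computes pvFields (fuel ≥ length suffices)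
lemma pv_go_eq (l : List Char) : ∀ (fuel : Nat) (cur : List Char) (acc : List (List Char)),
    l.length ≤ fuel →
    PySem.Chars.splitOn.go ['.'] fuel l cur acc =
      acc.reverse ++ (match pvFields l with
        | [] => []
        | f :: fs => (cur.reverse ++ f) :: fs) := by
  induction l with
  | nil =>
    intro fuel cur acc _
    cases fuel <;> simp [PySem.Chars.splitOn.go, pvFields]
  | cons c t ih =>
    intro fuel cur acc hf
    cases fuel with
    | zero => simp at hf
    | succ f =>
      rw [PySem.Chars.splitOn.go]
      by_cases hc : c = '.'
      · subst hc
        have hp : ['.'].isPrefixOf ('.' :: t) = true := by simp [List.isPrefixOf]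
        rw [if_pos hp]
        simp only [List.length_cons] at hf
        rw [show List.drop ['.'].length ('.' :: t) = t by simp]
        rw [ih f [] ((cur.reverse) :: acc) (by omega)]
        cases hft : pvFields t with
        | nil => exact absurd hft (pvFields_ne_nil t)
        | cons g gs => simp [pvFields, hft]
      · have hp : ['.'].isPrefixOf (c :: t) = false := by
          simp [List.isPrefixOf, Ne.symm hc]
        rw [if_neg (by simp [hp])]
        simp only [List.length_cons] at hf
        rw [ih f (c :: cur) acc (by omega)]
        cases hft : pvFields t with
        | nil => exact absurd hft (pvFields_ne_nil t)
        | cons g gs => simp [pvFields, hc, hft]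

lemma pv_splitOn_eq (l : List Char) : PySem.Chars.splitOn l ['.'] = pvFields l := by
  rw [PySem.Chars.splitOn, pv_go_eq l (l.length + 1) [] [] (by omega)]
  cases hft : pvFields l with
  | nil => exact absurd hft (pvFields_ne_nil l)
  | cons g gs => simp

lemma pv_parts_eq (fs : String) : pvParts fs = (pvFields fs.toList).map String.ofList := by
  rw [pvParts, PySem.Str.split?, PySem.Chars.split?]
  simp [pv_splitOn_eq]

-- find(".") characterised by takeWhile pvND
lemma pv_find_dot_of_not_mem (r : List Char) (h : '.' ∉ r) :
    PySem.Chars.find r ['.'] = -1 := by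
  rw [PySem.Chars.find_eq_neg_one_iff, List.singleton_infix_iff]
  exact h

lemma pv_prefix_dot_iff (r : List Char) (n : Nat) :
    (['.'] <+: r.drop n) ↔ r[n]? = some '.' := by
  cases hd : r.drop n with
  | nil =>
    simp only [List.prefix_nil]
    constructor
    · intro h; cases h
    · intro hx
      have := List.drop_eq_nil_iff.mp hd
      rw [List.getElem?_eq_none (by omega)] at hx
      cases hx
  | cons x xs =>
    constructor
    · rintro ⟨t, ht⟩
      simp only [List.singleton_append] at ht
      have hh : r[n]? = (r.drop n).head? := (List.head?_drop).symm
      rw [hh, hd, ← ht]; rfl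
    · intro hx
      have hh : r[n]? = (r.drop n).head? := (List.head?_drop).symm
      rw [hh, hd] at hx
      simp only [List.head?_cons, Option.some.injEq] at hx
      exact ⟨xs, by simp [hx]⟩

lemma pv_getElem_takeWhile_len (r : List Char) (h : '.' ∈ r) :
    r[(r.takeWhile pvND).length]? = some '.' := by
  induction r with
  | nil => simp at h
  | cons c t ih =>
    by_cases hc : c = '.'
    · subst hc; simp [List.takeWhile, pvND]
    · have hm : '.' ∈ t := by
        rcases List.mem_cons.mp h with h1 | h1
        · exact absurd h1.symm hc
        · exact h1
      have hnd : pvND c = true := by simp [pvND, hc]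
      simpa [List.takeWhile_cons, hnd] using ih hm

lemma pv_find_dot_of_mem (r : List Char) (h : '.' ∈ r) :
    PySem.Chars.find r ['.'] = ((r.takeWhile pvND).length : Int) := by
  have hinf : ['.'] <:+: r := (List.singleton_infix_iff _ _).mpr h
  have hnn : 0 ≤ PySem.Chars.find r ['.'] := (PySem.Chars.find_nonneg_iff r ['.']).mpr hinf
  obtain ⟨hpre, hmin⟩ := PySem.Chars.find_spec hnn
  set n := (PySem.Chars.find r ['.']).toNat with hn
  have hrn : r[n]? = some '.' := (pv_prefix_dot_iff r n).mp hpre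
  set tw := r.takeWhile pvND with htw
  have hdot : r[tw.length]? = some '.' := pv_getElem_takeWhile_len r h
  -- n ≤ tw.length by minimality
  have hle : n ≤ tw.length := by
    by_contra hgt
    exact hmin tw.length (by omega) ((pv_prefix_dot_iff r tw.length).mpr hdot)
  -- n < tw.length impossible: r[n] is inside takeWhile, hence not '.'
  have hge : ¬ n < tw.length := by
    intro hlt
    have htl : tw.length ≤ r.length := (List.takeWhile_prefix _).length_le
    have hpref : tw <+: r := List.takeWhile_prefix _
    have : r[n]'(by omega) = tw[n]'hlt := (hpref.getElem hlt).symm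
    have hmem : tw[n]'hlt ∈ tw := List.getElem_mem _
    have hnd := List.mem_takeWhile_imp hmem
    rw [List.getElem?_eq_getElem (by omega), this] at hrn
    simp only [Option.some.injEq] at hrn
    simp [pvND, hrn] at hnd
  have hneq : n = tw.length := by omega
  omega

-- dropWhile is the drop after takeWhile
lemma pv_dropWhile_eq_drop (r : List Char) :
    r.dropWhile pvND = r.drop (r.takeWhile pvND).length := by
  induction r with
  | nil => rfl
  | cons c t ih =>
    by_cases hc : pvND c = true
    · simp [List.dropWhile_cons, List.takeWhile_cons, hc, ih]
    · simp [List.dropWhile_cons, List.takeWhile_cons, hc]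

-- B's loop equals the adjacent-pair search over the fields of the remaining suffix
def pvF (full_symbol : String) (r : List Char) : String :=
  match ((pvFields r).zip (pvFields r).tail).find?
      (fun p => p.1 == ['U', 'S'] && decide (3 ≤ p.2.length)) with
  | some p => PySem.Str.upper (String.ofList (p.2.take 3))
  | none => pvFallback full_symbol

lemma pvB_loop_eq (fs : String) (s : List Char) :
    ∀ (m i : Nat), i ≤ s.length → s.length - i < m →
      pvB_loop fs s m i = pvF fs (s.drop i) := by
  intro m
  induction m with
  | zero =>
    intro i hi hm
    omega
  | succ m ih =>
    intro i hi hm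
    set r := s.drop i with hr
    by_cases hmem : ('.' : Char) ∈ r
    · -- there is a dot: j = i + tw.length
      set tw := r.takeWhile pvND with htw
      set r' := (r.dropWhile pvND).tail with hr'
      have htwlt : tw.length < r.length := by
        have h1 := pv_getElem_takeWhile_len r hmem
        obtain ⟨hlt, -⟩ := List.getElem?_eq_some_iff.mp h1
        omega
      have hrlen : r.length = s.length - i := by rw [hr, List.length_drop]
      have hfind : PySem.Chars.findFrom s ['.'] (i : Int) none = ((i + tw.length : Nat) : Int) := by
        rw [PySem.Chars.findFrom_natCast s ['.'] i hi, pv_find_dot_of_mem r hmem]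
        simp only [← htw, ← hr]
        rw [if_neg (by omega)]
        push_cast; ring
      have hjn : ((i + tw.length : Nat) : Int).toNat = i + tw.length := by omega
      have hr'eq : s.drop (i + tw.length + 1) = r' := by
        rw [hr', pv_dropWhile_eq_drop, ← htw, List.tail_drop, hr, List.drop_drop]
        ring_nf
      have hr'len : r'.length = s.length - (i + tw.length + 1) := by
        rw [← hr'eq, List.length_drop]
      -- the fields of r
      have hfr : pvFields r = tw :: pvFields r' := by
        rw [pvFields_of_mem r hmem]
      set tw' := r'.takeWhile pvND with htw'
      obtain ⟨fr', hfr'⟩ : ∃ fr', pvFields r' = tw' :: fr' := by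
        cases hpf : pvFields r' with
        | nil => exact absurd hpf (pvFields_ne_nil r')
        | cons f fs =>
          have := pvFields_head r'
          rw [hpf] at this
          simp only [List.head?_cons, Option.some.injEq] at this
          exact ⟨fs, by rw [this]⟩
      -- the slice s[i:j] is tw
      have hslice : PySem.Chars.slice s (some (i : Int)) (some ((i + tw.length : Nat) : Int)) = tw := by
        rw [PySem.Chars.slice_eq_listSlice, PySem.List.slice_natCast]
        rw [show i + tw.length - i = tw.length by omega, ← hr]
        exact (List.prefix_iff_eq_take.mp (List.takeWhile_prefix _)).symm
      -- the successor-field length: e - (j+1) = tw'.length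
      have hik : i + tw.length + 1 ≤ s.length := by omega
      have hfind2 : PySem.Chars.findFrom s ['.'] (((i + tw.length : Nat) : Int) + 1) none =
          (if PySem.Chars.find r' ['.'] = -1 then -1
           else ((i + tw.length + 1 : Nat) : Int) + PySem.Chars.find r' ['.']) := by
        rw [show (((i + tw.length : Nat) : Int) + 1) = ((i + tw.length + 1 : Nat) : Int) by push_cast; ring]
        rw [PySem.Chars.findFrom_natCast s ['.'] (i + tw.length + 1) hik, hr'eq]
      -- the candidate-result slice s[j+1:j+4] is r'.take 3
      have hslice2 : PySem.Chars.slice s (some (((i + tw.length : Nat) : Int) + 1))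
          (some (((i + tw.length : Nat) : Int) + 4)) = r'.take 3 := by
        rw [PySem.Chars.slice_eq_listSlice]
        rw [show (((i + tw.length : Nat) : Int) + 1) = ((i + tw.length + 1 : Nat) : Int) by push_cast; ring]
        rw [show (((i + tw.length : Nat) : Int) + 4) = ((i + tw.length + 1 + 3 : Nat) : Int) by push_cast; ring]
        rw [PySem.List.slice_natCast, hr'eq]
        congr 1
        omega
      rw [pvB_loop]
      simp only [hfind]
      rw [if_neg (by omega)]
      rw [hslice]
      rw [pvF, hfr, hfr']
      simp only [List.tail_cons, List.zip_cons_cons, List.find?_cons]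
      by_cases hus : tw = ['U', 'S']
      · have hbus : (tw == ['U', 'S']) = true := by simp [hus]
        rw [if_pos (by simp [hus])]
        simp only [hbus, Bool.true_and]
        by_cases h3 : 3 ≤ tw'.length
        · -- hit: the successor field is long enough
          have he3 : (3 : Int) ≤ (if PySem.Chars.findFrom s ['.'] (((i + tw.length : Nat) : Int) + 1) none = -1
              then (s.length : Int) else PySem.Chars.findFrom s ['.'] (((i + tw.length : Nat) : Int) + 1) none) -
              (((i + tw.length : Nat) : Int) + 1) := by
            rw [hfind2]
            by_cases hm' : ('.' : Char) ∈ r'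
            · rw [pv_find_dot_of_mem r' hm', ← htw']
              rw [if_neg (by omega)]
              rw [if_neg (by omega)]
              push_cast; omega
            · rw [pv_find_dot_of_not_mem r' hm']
              have htw'r : tw' = r' := by rw [htw', pv_takeWhile_of_not_mem r' hm']
              simp only [if_pos rfl]
              have : 3 ≤ r'.length := by rw [← htw'r]; exact h3
              push_cast; omega
          rw [if_pos he3, hslice2]
          simp only [decide_eq_true h3]
          -- r'.take 3 = tw'.take 3 since tw' is a ≥3-prefix of r'
          have htake : r'.take 3 = tw'.take 3 := by
            have hpt := List.prefix_iff_eq_take.mp (List.takeWhile_prefix (l := r') (p := pvND))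
            rw [← htw'] at hpt
            rw [hpt, List.take_take, min_eq_left h3]
          rw [htake]
        · -- the successor field is too short: skip to the next field
          have he3 : ¬ (3 : Int) ≤ (if PySem.Chars.findFrom s ['.'] (((i + tw.length : Nat) : Int) + 1) none = -1
              then (s.length : Int) else PySem.Chars.findFrom s ['.'] (((i + tw.length : Nat) : Int) + 1) none) -
              (((i + tw.length : Nat) : Int) + 1) := by
            rw [hfind2]
            by_cases hm' : ('.' : Char) ∈ r'
            · rw [pv_find_dot_of_mem r' hm', ← htw']
              rw [if_neg (by omega)]
              rw [if_neg (by omega)]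
              push_cast; omega
            · rw [pv_find_dot_of_not_mem r' hm']
              have htw'r : tw' = r' := by rw [htw', pv_takeWhile_of_not_mem r' hm']
              simp only [if_pos rfl]
              have : ¬ 3 ≤ r'.length := by rw [← htw'r]; exact h3
              push_cast; omega
          rw [if_neg he3]
          simp only [decide_eq_false h3, Bool.and_false]
          simp only [hjn]
          rw [ih (i + tw.length + 1) hik (by omega)]
          rw [hr'eq, pvF, hfr']
          simp only [List.tail_cons]
      · have hbus : (tw == ['U', 'S']) = false := by simp [hus]
        rw [if_neg (by simp [hus])]
        simp only [hbus, Bool.false_and]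
        simp only [hjn]
        rw [ih (i + tw.length + 1) hik (by omega)]
        rw [hr'eq, pvF, hfr']
        simp only [List.tail_cons]
    · -- no dot: last field, fallback on both sides
      have hfind : PySem.Chars.findFrom s ['.'] (i : Int) none = -1 := by
        rw [PySem.Chars.findFrom_natCast s ['.'] i hi, pv_find_dot_of_not_mem _ (by rw [← hr]; exact hmem)]
        simp
      rw [pvB_loop]
      simp only [hfind]
      rw [pvF, pvFields_of_not_mem r hmem]
      simp

lemma pvA_loop_eq (fs : String) :
    ∀ (suf pre : List String),
      pvA_loop fs (pre ++ suf) (PySem.List.enumerate suf (pre.length : Int)) =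
        (match (suf.zip suf.tail).find?
            (fun p => p.1 == "US" && decide (3 ≤ PySem.Str.len p.2)) with
         | some p => PySem.Str.upper (PySem.Str.slice p.2 none (some 3))
         | none => pvFallback fs) := by
  intro suf
  induction suf with
  | nil => intro pre; simp only [PySem.List.enumerate_nil]
           rfl
  | cons h t ih =>
    intro pre
    rw [PySem.List.enumerate_cons]
    cases t with
    | nil =>
      have hlen : (decide ((pre.length : Int) + 1 < (((pre ++ [h]).length : Nat) : Int))) = false := by
        simp
      simp only [pvA_loop, hlen, Bool.and_false, PySem.List.enumerate_nil,
        List.tail_cons, List.zip_nil_right, List.find?_nil]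
      simp [pvA_loop]
    | cons t0 t' =>
      have hlen : (decide ((pre.length : Int) + 1 < (((pre ++ h :: t0 :: t').length : Nat) : Int))) = true := by
        simp
      have hget : (PySem.List.pyGet? (pre ++ h :: t0 :: t') ((pre.length : Int) + 1)).getD "" = t0 := by
        have h1 : ((pre.length : Int) + 1) = ((pre.length + 1 : Nat) : Int) := by push_cast; ring
        rw [h1, PySem.List.pyGet?_natCast, List.getElem?_append_right (by omega)]
        simp
      have hih := ih (pre ++ [h])
      rw [List.append_assoc] at hih
      simp only [List.cons_append, List.nil_append] at hih
      have hlen2 : (((pre ++ [h]).length : Nat) : Int) = (pre.length : Int) + 1 := by simp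
      rw [hlen2] at hih
      simp only [pvA_loop, hlen, Bool.and_true, hget, List.tail_cons, List.zip_cons_cons,
        List.find?_cons]
      by_cases hus : h = "US"
      · subst hus
        by_cases h3 : 3 ≤ PySem.Str.len t0
        · simp only [beq_self_eq_true, if_true, decide_eq_true h3, Bool.and_self]
        · simp only [beq_self_eq_true, if_true, decide_eq_false h3, Bool.and_false,
            Bool.false_eq_true, if_false]
          rw [List.tail_cons] at hih
          exact hih
      · have hb : (h == "US") = false := by simp [hus]
        simp only [hb, Bool.false_and, Bool.false_eq_true, if_false]
        rw [List.tail_cons] at hih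
        exact hih

-- transfer the A-side search from parts (List String) to fields (List (List Char))
lemma pvA_eq_pvF (fs : String) : extract_symbol_display fs = pvF fs fs.toList := by
  rw [extract_symbol_display]
  have h0 := pvA_loop_eq fs (pvParts fs) []
  simp only [List.nil_append, List.length_nil, Nat.cast_zero] at h0
  rw [h0, pv_parts_eq, pvF]
  rw [← List.map_tail, List.zip_map, List.find?_map]
  have hpred : ((fun p => p.1 == "US" && decide (3 ≤ PySem.Str.len p.2)) ∘
      (Prod.map String.ofList String.ofList : List Char × List Char → String × String)) =
      (fun p : List Char × List Char => p.1 == ['U', 'S'] && decide (3 ≤ p.2.length)) := by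
    funext p
    simp only [Function.comp_apply, Prod.map_fst, Prod.map_snd]
    congr 1
    · show (String.ofList p.1 == "US") = (p.1 == ['U', 'S'])
      by_cases h : p.1 = ['U', 'S']
      · simp [h]
      · have h2 : String.ofList p.1 ≠ "US" := by
          intro heq
          apply h
          have := String.toList_inj.mpr heq
          simpa using this
        simp [h, h2]
    · congr 1
      simp [PySem.Str.len_eq]
  rw [hpred]
  cases hf : ((pvFields fs.toList).zip (pvFields fs.toList).tail).find?
      (fun p : List Char × List Char => p.1 == ['U', 'S'] && decide (3 ≤ p.2.length)) with
  | none => rfl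
  | some q =>
    simp only [Option.map_some]
    congr 1
    rw [← String.toList_inj]
    rw [PySem.Str.toList_slice]
    simp only [PySem.Chars.slice_eq_listSlice]
    rw [show (3 : Int) = ((3 : Nat) : Int) from rfl, PySem.List.slice_to_natCast]
    simp

-- ===== VERDICT (by name: the statement is the Claim_ definition above) =====
theorem extract_symbol_display_spec : Claim_equal_extract_symbol_display := by
  intro fs _
  unfold Spec_extract_symbol_display extract_symbol_display_alt
  rw [pvA_eq_pvF, pvB_loop_eq fs fs.toList (fs.toList.length + 1) 0 (Nat.zero_le _) (by omega)]
  simp
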